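-- pv_equiv track=rewrite | github.com/sainihimanshu1999/Interview-Bit | LEVEL 2/partitions.py | solve
-- ===== SOURCE A (Python) =====
-- def solve(A, B):
--     total = sum(B)
--     if total%3==0:
--         target = total//3
--     else:
--         return 0
--     ans = 0
--     f = 0
--     s = 0
--     for i in range(A-1):
--         s+=B[i]
--         if s==2*target:
--             ans += f
--         if s== target:
--             f += 1
--     return ans
-- ===== SOURCE B (Python) =====
-- def solve(A, B):
--     total = sum(B)
--     if total % 3 != 0:
--         return 0
--     target = total // 3
--     prefixes = []
--     s = 0
--     for i in range(A - 1):
--         s += B[i]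
--         prefixes.append(s)
--     ans = 0
--     twos = 0
--     for p in reversed(prefixes):
--         if p == target:
--             ans += twos
--         if p == 2 * target:
--             twos += 1
--     return ans
-- ===== Notes on version B (the rewrite author's own statement) =====
-- stated objective: alternative
-- what changed: B materialises the prefix sums and counts boundary pairs in a right-to-left scan keeping a counter of 2*target prefixes already seen, instead of A's fused left-to-right scan carrying a counter of target prefixes.
import Mathlib
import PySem

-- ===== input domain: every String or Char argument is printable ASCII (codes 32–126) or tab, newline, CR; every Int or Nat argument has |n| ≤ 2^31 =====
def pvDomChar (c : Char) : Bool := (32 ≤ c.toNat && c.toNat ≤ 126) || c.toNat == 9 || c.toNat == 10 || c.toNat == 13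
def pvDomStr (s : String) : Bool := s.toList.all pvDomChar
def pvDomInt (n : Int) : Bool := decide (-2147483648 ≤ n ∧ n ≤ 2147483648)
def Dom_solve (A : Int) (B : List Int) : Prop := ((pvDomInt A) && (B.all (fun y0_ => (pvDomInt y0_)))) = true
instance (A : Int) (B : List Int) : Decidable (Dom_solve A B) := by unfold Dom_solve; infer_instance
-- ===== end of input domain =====

-- B counts the equal-sum partition boundary pairs in a right-to-left scan over the
-- materialised prefix sums (counter of 2*target prefixes seen to the right), instead of
-- A's fused left-to-right scan (counter of target prefixes seen to the left); alternative
-- decomposition, same cost.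


-- ===== PORT A =====
def solve (A : Int) (B : List Int) : Int :=
  let total := B.sum
  if PySem.Int.mod total 3 = 0 then
    let target := PySem.Int.floordiv total 3
    let r := (PySem.List.pyRange 0 (A - 1) 1).foldl
      (fun (st : Int × Int × Int) i =>
        let s := st.1 + PySem.List.pyGetD B i 0
        (s, if s = 2 * target then st.2.1 + st.2.2 else st.2.1,
            if s = target then st.2.2 + 1 else st.2.2))
      (0, 0, 0)
    r.2.1
  else 0

-- ===== PORT B =====
def solve_alt (A : Int) (B : List Int) : Int :=
  let total := B.sum
  if PySem.Int.mod total 3 ≠ 0 then 0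
  else
    let target := PySem.Int.floordiv total 3
    let prefixes := ((PySem.List.pyRange 0 (A - 1) 1).foldl
      (fun (st : Int × List Int) i =>
        let s := st.1 + PySem.List.pyGetD B i 0
        (s, st.2 ++ [s]))
      (0, [])).2
    let r := prefixes.reverse.foldl
      (fun (q : Int × Int) p =>
        (if p = target then q.1 + q.2 else q.1,
         if p = 2 * target then q.2 + 1 else q.2))
      (0, 0)
    r.1

-- ===== PRECONDITION & SPEC =====
-- Pre_ excludes exactly the inputs where Python A raises IndexError: the sum is divisible
-- by 3 (so the loop runs) and the loop bound A-1 exceeds len(B).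
def Pre_solve (A : Int) (B : List Int) : Prop :=
  PySem.Int.mod B.sum 3 ≠ 0 ∨ A - 1 ≤ (B.length : Int)
instance (A : Int) (B : List Int) : Decidable (Pre_solve A B) := by unfold Pre_solve; infer_instance

def pvWitness_solve : Int × List Int := (3, [1, 1, 1])

def Spec_solve (A : Int) (B : List Int) (out : Int) : Prop := out = solve_alt A B
instance (A : Int) (B : List Int) (out : Int) : Decidable (Spec_solve A B out) := by unfold Spec_solve; infer_instance

-- ===== CLAIM (what is proved, stated in full; the proofs are below) =====
def Claim_equal_solve : Prop := ∀ (A : Int) (B : List Int), Dom_solve A B → Pre_solve A B → Spec_solve A B (solve A B)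

-- ===== LEMMAS AND PROOFS =====

/-- The list of running prefix sums A's loop passes through, over a list of indices. -/
def prefs (B : List Int) : Int → List Int → List Int
  | _, [] => []
  | s, i :: xs => (s + PySem.List.pyGetD B i 0) :: prefs B (s + PySem.List.pyGetD B i 0) xs

/-- count of prefixes equal to target -/
def c1 (t : Int) : List Int → Int
  | [] => 0
  | p :: l => (if p = t then 1 else 0) + c1 t l

/-- count of prefixes equal to 2*target -/
def c2 (t : Int) : List Int → Int
  | [] => 0
  | p :: l => (if p = 2 * t then 1 else 0) + c2 t l

/-- number of pairs i < j with P_i = t and P_j = 2*t -/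
def pr (t : Int) : List Int → Int
  | [] => 0
  | p :: l => (if p = t then c2 t l else 0) + pr t l

theorem foldA_eq (B : List Int) (t : Int) :
    ∀ (xs : List Int) (s a f : Int),
      (xs.foldl (fun (st : Int × Int × Int) i =>
          let s' := st.1 + PySem.List.pyGetD B i 0
          (s', if s' = 2 * t then st.2.1 + st.2.2 else st.2.1,
               if s' = t then st.2.2 + 1 else st.2.2)) (s, a, f)).2
      = (prefs B s xs).foldl (fun (q : Int × Int) p =>
          (if p = 2 * t then q.1 + q.2 else q.1,
           if p = t then q.2 + 1 else q.2)) (a, f) := by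
  intro xs
  induction xs with
  | nil => intro s a f; simp [prefs]
  | cons i xs ih => intro s a f; simp only [List.foldl_cons, prefs]; exact ih _ _ _

theorem foldP_eq (B : List Int) :
    ∀ (xs : List Int) (s : Int) (acc : List Int),
      (xs.foldl (fun (st : Int × List Int) i =>
          let s' := st.1 + PySem.List.pyGetD B i 0
          (s', st.2 ++ [s'])) (s, acc)).2
      = acc ++ prefs B s xs := by
  intro xs
  induction xs with
  | nil => intro s acc; simp [prefs]
  | cons i xs ih =>
    intro s acc
    simp only [List.foldl_cons, prefs]
    rw [ih]
    simp

theorem foldL_eq (t : Int) :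
    ∀ (P : List Int) (a f : Int),
      P.foldl (fun (q : Int × Int) p =>
          (if p = 2 * t then q.1 + q.2 else q.1,
           if p = t then q.2 + 1 else q.2)) (a, f)
      = (a + f * c2 t P + pr t P, f + c1 t P) := by
  intro P
  induction P with
  | nil => intro a f; simp [c1, c2, pr]
  | cons p l ih =>
    intro a f
    simp only [List.foldl_cons]
    rw [ih]
    simp only [c1, c2, pr]
    split_ifs with h1 h2 h2 <;> exact Prod.ext (by ring) (by ring)

theorem foldR_eq (t : Int) :
    ∀ (P : List Int) (a w : Int),
      P.foldr (fun p (q : Int × Int) =>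
          (if p = t then q.1 + q.2 else q.1,
           if p = 2 * t then q.2 + 1 else q.2)) (a, w)
      = (a + w * c1 t P + pr t P, w + c2 t P) := by
  intro P
  induction P with
  | nil => intro a w; simp [c1, c2, pr]
  | cons p l ih =>
    intro a w
    simp only [List.foldr_cons]
    rw [ih]
    simp only [c1, c2, pr]
    split_ifs with h1 h2 h2 <;> exact Prod.ext (by ring) (by ring)

-- ===== VERDICT (by name: the statement is the Claim_ definition above) =====
theorem solve_spec : Claim_equal_solve := by
  intro A B _ _
  simp only [Spec_solve, solve, solve_alt]
  split_ifs with h1 h2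
  · exact absurd h1 h2
  · rw [foldA_eq B _, foldP_eq B _ 0 [], List.nil_append, List.foldl_reverse,
      foldL_eq, foldR_eq]
    simp
  · rfl
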